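-- pv_equiv track=rewrite | github.com/marcosrodg/machine_learning | src1/app.py | modifying_weights
-- ===== SOURCE A (Python) =====
-- def modifying_weights(matrix):
--     """Calcula o valor dos pesos seguindo a Lei de Hebb
--
--     Args:
--         matrix (list): Recebe uma matriz, com valores logicos e calcula o valor dos pesos
--
--     Returns:
--         list: Retorna uma lista com os pesos calculados
--     """
--     row_aux = []
--     old_row = [0,0,0]
--     for row in matrix:
--         # multiplica valores da 3 posicao da lista com cada elemento ate a posicao 3
--         row_aux = [ value * row[3] for value in row[:3]]
--         # soma do valor dos pesos antigos com os novos(calculados  pelo algoritmo de Hebb)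
--         sum_rows = [sum(ele) for ele in zip(old_row, row_aux)]
--         old_row.clear()
--         # a lista antiga passa ser a lista com os pesos calculados neste ciclo
--         old_row = sum_rows
--     return old_row
-- ===== SOURCE B (Python) =====
-- def modifying_weights(matrix):
--     """Hebb weights: one column-oriented sum per weight position."""
--     return [sum(row[j] * row[3] for row in matrix) for j in range(3)]
-- ===== Notes on version B (the rewrite author's own statement) =====
-- stated objective: alternative
-- what changed: B computes each of the three weights independently as a column sum over the matrix (outer loop over the 3 positions, inner loop over rows), instead of A's single row-major pass that rebuilds and zips a 3-element accumulator list per row; Pre_ excludes matrices with a row shorter than 4 elements, on which A raises IndexError at row[3] except for a fully empty row, where A's comprehension short-circuits and returns a truncated accumulator while B still raises.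
-- outside the precondition, e.g. on modifying_weights([[1, 2, 3]]): A raises IndexError, B raises IndexError; on modifying_weights([[]]): A returns [], B raises IndexError
import Mathlib
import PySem

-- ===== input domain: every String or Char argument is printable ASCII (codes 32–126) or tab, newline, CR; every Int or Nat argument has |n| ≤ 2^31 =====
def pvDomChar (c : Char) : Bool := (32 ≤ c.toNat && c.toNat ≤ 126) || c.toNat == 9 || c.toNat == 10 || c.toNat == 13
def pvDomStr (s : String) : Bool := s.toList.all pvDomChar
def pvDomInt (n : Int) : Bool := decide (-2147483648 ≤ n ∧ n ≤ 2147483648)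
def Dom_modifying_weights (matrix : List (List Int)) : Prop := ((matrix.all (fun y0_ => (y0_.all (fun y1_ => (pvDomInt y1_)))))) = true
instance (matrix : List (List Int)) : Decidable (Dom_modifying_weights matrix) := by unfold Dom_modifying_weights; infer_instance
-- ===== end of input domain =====

-- B computes each of the three Hebb weights as an independent column sum (outer loop over
-- the 3 positions, inner loop over rows) instead of A's row-major accumulator pass.


-- ===== PORT A =====
-- row[3] is ported with pyGetD (default 0); Pre_ guarantees the index is in range.
def modifying_weights (matrix : List (List Int)) : List Int :=
  matrix.foldl (fun old_row row =>
    let row_aux := (PySem.List.slice row none (some 3)).map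
      (fun value => value * PySem.List.pyGetD row 3 0)
    (old_row.zip row_aux).map (fun ele => ele.1 + ele.2)) [0, 0, 0]

-- ===== PORT B =====
def modifying_weights_alt (matrix : List (List Int)) : List Int :=
  (PySem.List.pyRange 0 3 1).map (fun j =>
    matrix.foldl (fun acc row =>
      acc + PySem.List.pyGetD row j 0 * PySem.List.pyGetD row 3 0) 0)

-- ===== PRECONDITION & SPEC =====
-- Pre_ excludes matrices with a row shorter than 4 elements: Python A raises IndexError at row[3]
-- there, except that on a fully empty row A's comprehension short-circuits and A returns a
-- truncated accumulator, while B raises IndexError.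
def Pre_modifying_weights (matrix : List (List Int)) : Prop :=
  ∀ row ∈ matrix, 4 ≤ row.length
instance (matrix : List (List Int)) : Decidable (Pre_modifying_weights matrix) := by
  unfold Pre_modifying_weights; infer_instance
def pvWitness_modifying_weights : List (List Int) := [[1, 2, 3, 4], [1, 0, 1, -1]]
def Spec_modifying_weights (matrix : List (List Int)) (out : List Int) : Prop := out = modifying_weights_alt matrix
instance (matrix : List (List Int)) (out : List Int) : Decidable (Spec_modifying_weights matrix out) := by unfold Spec_modifying_weights; infer_instance

-- ===== CLAIM (what is proved, stated in full; the proofs are below) =====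
def Claim_equal_modifying_weights : Prop := ∀ (matrix : List (List Int)), Dom_modifying_weights matrix → Pre_modifying_weights matrix → Spec_modifying_weights matrix (modifying_weights matrix)

-- ===== LEMMAS AND PROOFS =====

-- one column sum of B, with an arbitrary start
def colSum (matrix : List (List Int)) (j : Int) (s : Int) : Int :=
  matrix.foldl (fun acc row =>
    acc + PySem.List.pyGetD row j 0 * PySem.List.pyGetD row 3 0) s

theorem step_eq (row : List Int) (s0 s1 s2 : Int) (h : 4 ≤ row.length) :
    (([s0, s1, s2].zip ((PySem.List.slice row none (some 3)).map
        (fun value => value * PySem.List.pyGetD row 3 0))).map (fun ele => ele.1 + ele.2))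
    = [s0 + PySem.List.pyGetD row 0 0 * PySem.List.pyGetD row 3 0,
       s1 + PySem.List.pyGetD row 1 0 * PySem.List.pyGetD row 3 0,
       s2 + PySem.List.pyGetD row 2 0 * PySem.List.pyGetD row 3 0] := by
  match row, h with
  | a :: b :: c :: d :: t, _ =>
    simp [PySem.List.pyGetD_ofNat', PySem.List.slice]

theorem foldA_eq (matrix : List (List Int)) (s0 s1 s2 : Int)
    (hpre : ∀ row ∈ matrix, 4 ≤ row.length) :
    matrix.foldl (fun old_row row =>
      (old_row.zip ((PySem.List.slice row none (some 3)).map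
        (fun value => value * PySem.List.pyGetD row 3 0))).map (fun ele => ele.1 + ele.2))
      [s0, s1, s2]
    = [colSum matrix 0 s0, colSum matrix 1 s1, colSum matrix 2 s2] := by
  induction matrix generalizing s0 s1 s2 with
  | nil => simp [colSum]
  | cons r rs ih =>
    have hr : 4 ≤ r.length := hpre r (by simp)
    simp only [List.foldl_cons, step_eq r s0 s1 s2 hr]
    rw [ih _ _ _ (fun row hm => hpre row (by simp [hm]))]
    simp [colSum]

-- ===== VERDICT (by name: the statement is the Claim_ definition above) =====
theorem modifying_weights_spec : Claim_equal_modifying_weights := by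
  intro matrix _ hpre
  unfold Spec_modifying_weights modifying_weights modifying_weights_alt
  rw [foldA_eq matrix 0 0 0 hpre]
  simp [colSum, PySem.List.pyRange]
  rfl
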